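-- pv_equiv track=rewrite | github.com/smvfe/ITMO | CT2/DM/4sem/GenFunctions/B.py | ln_1_plus_p
-- ===== SOURCE A (Python) =====
-- mod = 998244353
--
-- def ln_1_plus_p(p, m):
--     q = [0] * m
--     q[0] = 1
--     for i in range(1, len(p)):
--         if i < m:
--             q[i] = p[i] % mod
--
--     R = [0] * m
--     R[0] = 1
--     for k in range(1, m):
--         sum_r = 0
--         for i in range(1, k + 1):
--             if i < len(q) and (k - i) < len(R):
--                 sum_r = (sum_r + q[i] * R[k - i]) % mod
--         R[k] = (-sum_r) % mod
--
--     p_prime = [0] * m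
--     for i in range(1, len(p)):
--         if i - 1 < m:
--             p_prime[i - 1] = (i * p[i]) % mod
--
--     l_prime = [0] * m
--     for k in range(m):
--         sum_lp = 0
--         for i in range(k + 1):
--             if i < len(p_prime) and (k - i) < len(R):
--                 sum_lp = (sum_lp + p_prime[i] * R[k - i]) % mod
--         l_prime[k] = sum_lp % mod
--
--     l = [0] * m
--     for k in range(1, m):
--         if k - 1 < len(l_prime):
--             inv_k = pow(k, mod - 2, mod)
--             l[k] = l_prime[k - 1] * inv_k % mod
--     return l
-- ===== SOURCE B (Python) =====
-- mod = 998244353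
--
-- def ln_1_plus_p(p, m):
--     # Solve q * l' = p' directly (q = 1 + p truncated), avoiding the explicit
--     # series inverse R and the second convolution of the original.
--     n = len(p)
--     lp = [0] * m
--     for k in range(m):
--         s = (k + 1) * p[k + 1] % mod if k + 1 < n else 0
--         for i in range(1, min(k, n - 1) + 1):
--             s -= p[i] % mod * lp[k - i]
--         lp[k] = s % mod
--     l = [0] * m
--     for k in range(1, m):
--         l[k] = lp[k - 1] * pow(k, mod - 2, mod) % mod
--     return l
-- ===== Notes on version B (the rewrite author's own statement) =====
-- stated objective: faster
-- what changed: B computes l' in one pass by solving the triangular system q*l' = p' directly (division-style recurrence), instead of A's two-stage scheme that first builds the full series inverse R = 1/q by one O(m^2) convolution loop and then convolves p' with R in a second O(m^2) loop.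
import Mathlib
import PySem

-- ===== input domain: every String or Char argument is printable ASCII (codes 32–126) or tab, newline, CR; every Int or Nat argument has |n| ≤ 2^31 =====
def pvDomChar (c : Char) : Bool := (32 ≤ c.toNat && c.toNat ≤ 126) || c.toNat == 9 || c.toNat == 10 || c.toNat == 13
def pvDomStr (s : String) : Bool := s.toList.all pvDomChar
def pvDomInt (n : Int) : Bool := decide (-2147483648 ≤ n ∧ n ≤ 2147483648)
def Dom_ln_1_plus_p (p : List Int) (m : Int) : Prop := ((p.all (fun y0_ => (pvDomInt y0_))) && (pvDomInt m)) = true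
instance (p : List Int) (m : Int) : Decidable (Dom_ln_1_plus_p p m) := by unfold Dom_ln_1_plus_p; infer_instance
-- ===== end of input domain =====

-- B replaces A's two O(m^2) convolution stages (series inverse R = 1/q, then p' * R)
-- by one direct recurrence solving q * l' = p'; measured faster (constant factor, and
-- asymptotically fewer inner iterations when len(p) << m).


-- ===== PORT A =====
def pvMod : Int := 998244353

-- port of Python's built-in pow(b, e, md) for md > 0 (square-and-multiply; exact on that domain)
def pvPowMod (b : Int) (e : Nat) (md : Int) : Int :=
  if e = 0 then PySem.Int.mod 1 md
  else
    let h := pvPowMod (PySem.Int.mod (b * b) md) (e / 2) md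
    if e % 2 = 1 then PySem.Int.mod (h * b) md else h
termination_by e
decreasing_by exact Nat.div_lt_self (Nat.pos_of_ne_zero (by assumption)) one_lt_two

def ln_1_plus_p (p : List Int) (m : Int) : List Int :=
  let q0 := PySem.List.pySetD (List.replicate m.toNat 0) 0 1
  let q := (PySem.List.pyRange 1 (p.length : Int) 1).foldl (fun q i =>
    if i < m then PySem.List.pySetD q i (PySem.Int.mod (PySem.List.pyGetD p i 0) pvMod) else q) q0
  let R0 := PySem.List.pySetD (List.replicate m.toNat 0) 0 1
  let R := (PySem.List.pyRange 1 m 1).foldl (fun R k =>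
    let sum_r := (PySem.List.pyRange 1 (k + 1) 1).foldl (fun s i =>
      if i < (q.length : Int) ∧ k - i < (R.length : Int) then
        PySem.Int.mod (s + PySem.List.pyGetD q i 0 * PySem.List.pyGetD R (k - i) 0) pvMod
      else s) 0
    PySem.List.pySetD R k (PySem.Int.mod (-sum_r) pvMod)) R0
  let pp := (PySem.List.pyRange 1 (p.length : Int) 1).foldl (fun pp i =>
    if i - 1 < m then PySem.List.pySetD pp (i - 1) (PySem.Int.mod (i * PySem.List.pyGetD p i 0) pvMod) else pp)
    (List.replicate m.toNat 0)
  let lp := (PySem.List.pyRange 0 m 1).foldl (fun lp k =>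
    let sum_lp := (PySem.List.pyRange 0 (k + 1) 1).foldl (fun s i =>
      if i < (pp.length : Int) ∧ k - i < (R.length : Int) then
        PySem.Int.mod (s + PySem.List.pyGetD pp i 0 * PySem.List.pyGetD R (k - i) 0) pvMod
      else s) 0
    PySem.List.pySetD lp k (PySem.Int.mod sum_lp pvMod)) (List.replicate m.toNat 0)
  (PySem.List.pyRange 1 m 1).foldl (fun l k =>
    if k - 1 < (lp.length : Int) then
      let inv_k := pvPowMod k (998244353 - 2) pvMod
      PySem.List.pySetD l k (PySem.Int.mod (PySem.List.pyGetD lp (k - 1) 0 * inv_k) pvMod)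
    else l) (List.replicate m.toNat 0)

-- ===== PORT B =====
def ln_1_plus_p_alt (p : List Int) (m : Int) : List Int :=
  let n : Int := (p.length : Int)
  let lp := (PySem.List.pyRange 0 m 1).foldl (fun lp k =>
    let s0 : Int := if k + 1 < n then PySem.Int.mod ((k + 1) * PySem.List.pyGetD p (k + 1) 0) pvMod else 0
    let s := (PySem.List.pyRange 1 (min k (n - 1) + 1) 1).foldl (fun s i =>
      s - PySem.Int.mod (PySem.List.pyGetD p i 0) pvMod * PySem.List.pyGetD lp (k - i) 0) s0
    PySem.List.pySetD lp k (PySem.Int.mod s pvMod)) (List.replicate m.toNat 0)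
  (PySem.List.pyRange 1 m 1).foldl (fun l k =>
    PySem.List.pySetD l k (PySem.Int.mod (PySem.List.pyGetD lp (k - 1) 0 * pvPowMod k (998244353 - 2) pvMod) pvMod))
    (List.replicate m.toNat 0)

-- ===== PRECONDITION & SPEC =====
-- Python A does `q = [0]*m; q[0] = 1`, an IndexError whenever m ≤ 0; those inputs are excluded.
def Pre_ln_1_plus_p (p : List Int) (m : Int) : Prop := 1 ≤ m
instance (p : List Int) (m : Int) : Decidable (Pre_ln_1_plus_p p m) := by unfold Pre_ln_1_plus_p; infer_instance
def pvWitness_ln_1_plus_p : List Int × Int := ([3, 5, -7], 4)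

def Spec_ln_1_plus_p (p : List Int) (m : Int) (out : List Int) : Prop := out = ln_1_plus_p_alt p m
instance (p : List Int) (m : Int) (out : List Int) : Decidable (Spec_ln_1_plus_p p m out) := by unfold Spec_ln_1_plus_p; infer_instance

-- ===== CLAIM (what is proved, stated in full; the proofs are below) =====
def Claim_equal_ln_1_plus_p : Prop := ∀ (p : List Int) (m : Int), Dom_ln_1_plus_p p m → Pre_ln_1_plus_p p m → Spec_ln_1_plus_p p m (ln_1_plus_p p m)

-- ===== LEMMAS AND PROOFS =====

-- the bridge Int ↔ ZMod 998244353
def toI (z : ZMod 998244353) : Int := (z.val : Int)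

lemma toI_nonneg (z : ZMod 998244353) : 0 ≤ toI z := Int.natCast_nonneg _

lemma toI_lt (z : ZMod 998244353) : toI z < 998244353 := by
  have := ZMod.val_lt z
  unfold toI
  exact_mod_cast this

lemma cast_toI (z : ZMod 998244353) : ((toI z : Int) : ZMod 998244353) = z := by
  simp [toI, ZMod.intCast_cast]

lemma mod_toI (x : Int) : PySem.Int.mod x pvMod = toI ((x : Int) : ZMod 998244353) := by
  rw [PySem.Int.mod_eq_emod_of_pos (by norm_num [pvMod])]
  have h := ZMod.val_intCast (n := 998244353) x
  simp [toI, pvMod, h]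

lemma cast_mod (x : Int) : ((PySem.Int.mod x pvMod : Int) : ZMod 998244353) = (x : ZMod 998244353) := by
  rw [mod_toI, cast_toI]

lemma toI_cast_of_range (x : Int) (h0 : 0 ≤ x) (h1 : x < 998244353) :
    toI ((x : Int) : ZMod 998244353) = x := by
  have h := ZMod.val_intCast (n := 998244353) x
  unfold toI
  rw [h]
  have : ((998244353 : ℕ) : ℤ) = 998244353 := by norm_num
  rw [this]
  exact Int.emod_eq_of_lt h0 h1

lemma toI_zero : toI 0 = 0 := by simp [toI]

lemma toI_one : toI 1 = 1 := by
  have h : ((1 : Int) : ZMod 998244353) = 1 := by norm_num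
  rw [← h, toI_cast_of_range] <;> norm_num

-- spec sequences over ZMod 998244353
def Qc (p : List Int) (mN : Nat) (i : Nat) : ZMod 998244353 :=
  if i = 0 then 1 else if i < p.length ∧ i < mN then ((p.getD i 0 : Int) : ZMod 998244353) else 0

def Pc (p : List Int) (i : Nat) : ZMod 998244353 :=
  if i + 1 < p.length then ((((i : Int) + 1) * p.getD (i + 1) 0 : Int) : ZMod 998244353) else 0

def Rc (Q : Nat → ZMod 998244353) : Nat → ZMod 998244353
  | 0 => 1
  | (k + 1) => -(∑ i ∈ Finset.range (k + 1), Q (i + 1) * Rc Q (k - i))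
termination_by k => k
decreasing_by exact Nat.lt_succ_of_le (Nat.sub_le _ _)

def LBc (Q P : Nat → ZMod 998244353) : Nat → ZMod 998244353
  | 0 => P 0
  | (k + 1) => P (k + 1) - ∑ i ∈ Finset.range (k + 1), Q (i + 1) * LBc Q P (k - i)
termination_by k => k
decreasing_by exact Nat.lt_succ_of_le (Nat.sub_le _ _)

def LAc (Q P : Nat → ZMod 998244353) (k : Nat) : ZMod 998244353 :=
  ∑ i ∈ Finset.range (k + 1), P i * Rc Q (k - i)

-- the convolution core: q * R = 1 and q * lB = p' force p' * R = lB coefficientwise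
lemma q_mul_r (Q : Nat → ZMod 998244353) (hQ0 : Q 0 = 1) :
    (PowerSeries.mk Q) * (PowerSeries.mk (Rc Q)) = 1 := by
  ext n
  rw [PowerSeries.coeff_mul, Finset.Nat.sum_antidiagonal_eq_sum_range_succ_mk]
  cases n with
  | zero => simp [hQ0, Rc]
  | succ k =>
    rw [Finset.sum_range_succ']
    simp only [PowerSeries.coeff_mk]
    have h1 : ∀ i, k + 1 - (i + 1) = k - i := fun i => by omega
    simp only [h1, hQ0, Nat.sub_zero, one_mul]
    rw [Rc]
    simp [PowerSeries.coeff_one]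

lemma q_mul_lb (Q P : Nat → ZMod 998244353) (hQ0 : Q 0 = 1) :
    (PowerSeries.mk Q) * (PowerSeries.mk (LBc Q P)) = PowerSeries.mk P := by
  ext n
  rw [PowerSeries.coeff_mul, Finset.Nat.sum_antidiagonal_eq_sum_range_succ_mk]
  cases n with
  | zero => simp [hQ0, LBc]
  | succ k =>
    rw [Finset.sum_range_succ']
    simp only [PowerSeries.coeff_mk]
    have h1 : ∀ i, k + 1 - (i + 1) = k - i := fun i => by omega
    simp only [h1, hQ0, Nat.sub_zero, one_mul]
    rw [LBc]
    ring

lemma LA_eq_LB (Q P : Nat → ZMod 998244353) (hQ0 : Q 0 = 1) (k : Nat) :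
    LAc Q P k = LBc Q P k := by
  have h : (PowerSeries.mk P) * (PowerSeries.mk (Rc Q)) = PowerSeries.mk (LBc Q P) := by
    calc (PowerSeries.mk P) * (PowerSeries.mk (Rc Q))
        = ((PowerSeries.mk Q) * (PowerSeries.mk (LBc Q P))) * (PowerSeries.mk (Rc Q)) := by
          rw [q_mul_lb Q P hQ0]
      _ = (PowerSeries.mk (LBc Q P)) * ((PowerSeries.mk Q) * (PowerSeries.mk (Rc Q))) := by ring
      _ = PowerSeries.mk (LBc Q P) := by rw [q_mul_r Q hQ0, mul_one]
  have h2 := congrArg (fun φ : PowerSeries (ZMod 998244353) => PowerSeries.coeff k φ) h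
  simp only [] at h2
  rw [PowerSeries.coeff_mul, Finset.Nat.sum_antidiagonal_eq_sum_range_succ_mk] at h2
  simpa [LAc, PowerSeries.coeff_mk] using h2

-- generic fold shapes
lemma modsum (L : List Int) (g : Int → Int) (s0 : Int) (h0 : 0 ≤ s0) (h1 : s0 < 998244353) :
    L.foldl (fun s i => PySem.Int.mod (s + g i) pvMod) s0
      = toI ((s0 : ZMod 998244353) + (L.map (fun i => ((g i : Int) : ZMod 998244353))).sum) := by
  induction L generalizing s0 with
  | nil =>
    simp only [List.foldl_nil, List.map_nil, List.sum_nil, add_zero]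
    rw [toI_cast_of_range s0 h0 h1]
  | cons x t ih =>
    simp only [List.foldl_cons, List.map_cons, List.sum_cons]
    rw [mod_toI, ih _ (toI_nonneg _) (toI_lt _)]
    congr 1
    rw [cast_toI]
    push_cast
    ring

lemma subsum (L : List Int) (g : Int → Int) (s0 : Int) :
    L.foldl (fun s i => s - g i) s0 = s0 - (L.map g).sum := by
  induction L generalizing s0 with
  | nil => simp
  | cons x t ih => simp [ih, sub_sub]

lemma sum_map_range (f : Nat → ZMod 998244353) (n : Nat) :
    ((List.range n).map f).sum = ∑ i ∈ Finset.range n, f i := by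
  induction n with
  | zero => simp
  | succ n ih => simp [List.range_succ, Finset.sum_range_succ, ih]

lemma foldl_length {F : List Int → Int → List Int}
    (h : ∀ l i, (F l i).length = l.length) :
    ∀ (L : List Int) (l0 : List Int), (L.foldl F l0).length = l0.length := by
  intro L
  induction L with
  | nil => intro l0; rfl
  | cons x t ih => intro l0; rw [List.foldl_cons, ih, h]

-- stage functions: the five loops of port A and the loop of port B, named
def aQ (p : List Int) (m : Int) : List Int :=
  (PySem.List.pyRange 1 (p.length : Int) 1).foldl (fun q i =>
    if i < m then PySem.List.pySetD q i (PySem.Int.mod (PySem.List.pyGetD p i 0) pvMod) else q)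
    (PySem.List.pySetD (List.replicate m.toNat 0) 0 1)

def aQpart (p : List Int) (m : Int) (b : Nat) : List Int :=
  (PySem.List.pyRange 1 (b : Int) 1).foldl (fun q i =>
    if i < m then PySem.List.pySetD q i (PySem.Int.mod (PySem.List.pyGetD p i 0) pvMod) else q)
    (PySem.List.pySetD (List.replicate m.toNat 0) 0 1)

def aRbody (p : List Int) (m : Int) : List Int → Int → List Int := fun R k =>
  let sum_r := (PySem.List.pyRange 1 (k + 1) 1).foldl (fun s i =>
    if i < ((aQ p m).length : Int) ∧ k - i < (R.length : Int) then
      PySem.Int.mod (s + PySem.List.pyGetD (aQ p m) i 0 * PySem.List.pyGetD R (k - i) 0) pvMod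
    else s) 0
  PySem.List.pySetD R k (PySem.Int.mod (-sum_r) pvMod)

def aRpart (p : List Int) (m : Int) (b : Nat) : List Int :=
  (PySem.List.pyRange 1 (b : Int) 1).foldl (aRbody p m)
    (PySem.List.pySetD (List.replicate m.toNat 0) 0 1)

def aR (p : List Int) (m : Int) : List Int :=
  (PySem.List.pyRange 1 m 1).foldl (aRbody p m)
    (PySem.List.pySetD (List.replicate m.toNat 0) 0 1)

def aPPpart (p : List Int) (m : Int) (b : Nat) : List Int :=
  (PySem.List.pyRange 1 (b : Int) 1).foldl (fun pp i =>
    if i - 1 < m then PySem.List.pySetD pp (i - 1) (PySem.Int.mod (i * PySem.List.pyGetD p i 0) pvMod) else pp)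
    (List.replicate m.toNat 0)

def aPP (p : List Int) (m : Int) : List Int := aPPpart p m p.length

def aLPbody (p : List Int) (m : Int) : List Int → Int → List Int := fun lp k =>
  let sum_lp := (PySem.List.pyRange 0 (k + 1) 1).foldl (fun s i =>
    if i < ((aPP p m).length : Int) ∧ k - i < ((aR p m).length : Int) then
      PySem.Int.mod (s + PySem.List.pyGetD (aPP p m) i 0 * PySem.List.pyGetD (aR p m) (k - i) 0) pvMod
    else s) 0
  PySem.List.pySetD lp k (PySem.Int.mod sum_lp pvMod)

def aLPpart (p : List Int) (m : Int) (b : Nat) : List Int :=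
  (PySem.List.pyRange 0 (b : Int) 1).foldl (aLPbody p m) (List.replicate m.toNat 0)

def aLP (p : List Int) (m : Int) : List Int :=
  (PySem.List.pyRange 0 m 1).foldl (aLPbody p m) (List.replicate m.toNat 0)

def bLPbody (p : List Int) : List Int → Int → List Int := fun lp k =>
  let s0 : Int := if k + 1 < (p.length : Int) then
      PySem.Int.mod ((k + 1) * PySem.List.pyGetD p (k + 1) 0) pvMod else 0
  let s := (PySem.List.pyRange 1 (min k ((p.length : Int) - 1) + 1) 1).foldl (fun s i =>
    s - PySem.Int.mod (PySem.List.pyGetD p i 0) pvMod * PySem.List.pyGetD lp (k - i) 0) s0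
  PySem.List.pySetD lp k (PySem.Int.mod s pvMod)

def bLPpart (p : List Int) (m : Int) (b : Nat) : List Int :=
  (PySem.List.pyRange 0 (b : Int) 1).foldl (bLPbody p) (List.replicate m.toNat 0)

def bLP (p : List Int) (m : Int) : List Int :=
  (PySem.List.pyRange 0 m 1).foldl (bLPbody p) (List.replicate m.toNat 0)

def aFin (p : List Int) (m : Int) : List Int :=
  (PySem.List.pyRange 1 m 1).foldl (fun l k =>
    if k - 1 < ((aLP p m).length : Int) then
      PySem.List.pySetD l k (PySem.Int.mod (PySem.List.pyGetD (aLP p m) (k - 1) 0 * pvPowMod k (998244353 - 2) pvMod) pvMod)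
    else l) (List.replicate m.toNat 0)

def bFin (p : List Int) (m : Int) : List Int :=
  (PySem.List.pyRange 1 m 1).foldl (fun l k =>
    PySem.List.pySetD l k (PySem.Int.mod (PySem.List.pyGetD (bLP p m) (k - 1) 0 * pvPowMod k (998244353 - 2) pvMod) pvMod))
    (List.replicate m.toNat 0)

-- lengths
lemma aQpart_length (p : List Int) (m : Int) (b : Nat) : (aQpart p m b).length = m.toNat := by
  unfold aQpart
  rw [foldl_length]
  · simp [PySem.List.length_pySetD]
  · intro l i; dsimp only; split <;> simp [PySem.List.length_pySetD]

lemma aRpart_length (p : List Int) (m : Int) (b : Nat) : (aRpart p m b).length = m.toNat := by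
  unfold aRpart aRbody
  rw [foldl_length]
  · simp [PySem.List.length_pySetD]
  · intro l i; simp [PySem.List.length_pySetD]

lemma aR_length (p : List Int) (m : Int) : (aR p m).length = m.toNat := by
  unfold aR aRbody
  rw [foldl_length]
  · simp [PySem.List.length_pySetD]
  · intro l i; simp [PySem.List.length_pySetD]

lemma aPPpart_length (p : List Int) (m : Int) (b : Nat) : (aPPpart p m b).length = m.toNat := by
  unfold aPPpart
  rw [foldl_length]
  · simp
  · intro l i; dsimp only; split <;> simp [PySem.List.length_pySetD]

lemma aLPpart_length (p : List Int) (m : Int) (b : Nat) : (aLPpart p m b).length = m.toNat := by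
  unfold aLPpart aLPbody
  rw [foldl_length]
  · simp
  · intro l i; simp [PySem.List.length_pySetD]

lemma aLP_length (p : List Int) (m : Int) : (aLP p m).length = m.toNat := by
  unfold aLP aLPbody
  rw [foldl_length]
  · simp
  · intro l i; simp [PySem.List.length_pySetD]

lemma bLPpart_length (p : List Int) (m : Int) (b : Nat) : (bLPpart p m b).length = m.toNat := by
  unfold bLPpart bLPbody
  rw [foldl_length]
  · simp
  · intro l i; simp [PySem.List.length_pySetD]

-- q-loop characterization
lemma aQpart_getD (p : List Int) (m : Int) (hm : 1 ≤ m) (b : Nat) (t : Nat) (ht : t < m.toNat) :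
    (aQpart p m b).getD t 0 =
      if 1 ≤ t ∧ t < b then PySem.Int.mod (p.getD t 0) pvMod else (if t = 0 then 1 else 0) := by
  induction b with
  | zero =>
    unfold aQpart
    rw [PySem.List.pyRange_one_eq_nil (by norm_num), List.foldl_nil,
        PySem.List.pySetD_of_nonneg _ _ (by norm_num)]
    have hlen : t < ((List.replicate m.toNat (0:Int)).set (0:Int).toNat 1).length := by
      simpa using ht
    rw [List.getD_eq_getElem _ _ hlen, List.getElem_set]
    simp only [Int.toNat_zero]
    split
    · rw [if_neg (show ¬(1 ≤ t ∧ t < 0) by omega), if_pos (by omega : t = 0)]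
    · rw [List.getElem_replicate, if_neg (show ¬(1 ≤ t ∧ t < 0) by omega),
          if_neg (by omega : ¬ t = 0)]
  | succ b ih =>
    by_cases hb : b = 0
    · subst hb
      unfold aQpart
      rw [show ((1:Nat) : Int) = 1 by norm_num, PySem.List.pyRange_one_eq_nil (by norm_num), List.foldl_nil]
      unfold aQpart at ih
      rw [PySem.List.pyRange_one_eq_nil (by norm_num), List.foldl_nil] at ih
      rw [ih]
      have h1 : ¬ (1 ≤ t ∧ t < 0) := by omega
      have h2 : ¬ (1 ≤ t ∧ t < 1) := by omega
      rw [if_neg h1, if_neg h2]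
    · have hb1 : (1 : Int) ≤ (b : Int) := by omega
      have hsplit : PySem.List.pyRange 1 ((b + 1 : Nat) : Int) 1
          = PySem.List.pyRange 1 (b : Int) 1 ++ [(b : Int)] := by
        have : ((b + 1 : Nat) : Int) = (b : Int) + 1 := by push_cast; ring
        rw [this, PySem.List.pyRange_one_succ_right hb1]
      unfold aQpart at ih ⊢
      rw [hsplit, List.foldl_append, List.foldl_cons, List.foldl_nil]
      set prev := (PySem.List.pyRange 1 (b : Int) 1).foldl (fun q i =>
        if i < m then PySem.List.pySetD q i (PySem.Int.mod (PySem.List.pyGetD p i 0) pvMod) else q)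
        (PySem.List.pySetD (List.replicate m.toNat 0) 0 1) with hprev
      have hplen : prev.length = m.toNat := by rw [hprev]; exact aQpart_length p m b
      by_cases hcm : (b : Int) < m
      · rw [if_pos hcm, PySem.List.pySetD_of_nonneg _ _ (by omega)]
        have hbt : ((b : Int)).toNat = b := by omega
        have hlen : t < (prev.set ((b:Int)).toNat (PySem.Int.mod (PySem.List.pyGetD p (b:Int) 0) pvMod)).length := by
          simp [hplen, ht]
        rw [List.getD_eq_getElem _ _ hlen, List.getElem_set]
        simp only [hbt]
        by_cases htb : b = t
        · subst htb
          rw [if_pos rfl]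
          have : PySem.List.pyGetD p ((b : Nat) : Int) 0 = p.getD b 0 := PySem.List.pyGetD_natCast p b 0
          rw [this]
          have hc : 1 ≤ b ∧ b < b + 1 := by omega
          rw [if_pos hc]
        · rw [if_neg htb, ← List.getD_eq_getElem _ _ (by omega : t < prev.length), ih]
          have : (1 ≤ t ∧ t < b) ↔ (1 ≤ t ∧ t < b + 1) := by omega
          rw [if_congr this rfl rfl]
      · rw [if_neg hcm, ih]
        have hmb : m.toNat ≤ b := by omega
        have : (1 ≤ t ∧ t < b) ↔ (1 ≤ t ∧ t < b + 1) := by omega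
        rw [if_congr this rfl rfl]

lemma aQ_getD (p : List Int) (m : Int) (hm : 1 ≤ m) (t : Nat) (ht : t < m.toNat) :
    (aQ p m).getD t 0 = toI (Qc p m.toNat t) := by
  have h : aQ p m = aQpart p m p.length := rfl
  rw [h, aQpart_getD p m hm p.length t ht]
  unfold Qc
  by_cases h0 : t = 0
  · subst h0; simp [toI_one]
  · rw [if_neg h0]
    by_cases h1 : t < p.length
    · rw [if_pos (show 1 ≤ t ∧ t < p.length from ⟨by omega, h1⟩),
          if_pos (show t < p.length ∧ t < m.toNat from ⟨h1, ht⟩), mod_toI, if_neg h0]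
    · rw [if_neg (show ¬(1 ≤ t ∧ t < p.length) by omega),
          if_neg (show ¬(t < p.length ∧ t < m.toNat) by tauto), if_neg h0, toI_zero]

-- p'-loop characterization
lemma aPPpart_getD (p : List Int) (m : Int) (hm : 1 ≤ m) (b : Nat) (t : Nat) (ht : t < m.toNat) :
    (aPPpart p m b).getD t 0 =
      if t + 1 < b then PySem.Int.mod (((t : Int) + 1) * p.getD (t + 1) 0) pvMod else 0 := by
  induction b with
  | zero =>
    unfold aPPpart
    rw [PySem.List.pyRange_one_eq_nil (by norm_num), List.foldl_nil]
    rw [List.getD_eq_getElem _ _ (by simpa using ht : t < (List.replicate m.toNat (0:Int)).length)]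
    simp
  | succ b ih =>
    by_cases hb : b = 0
    · subst hb
      unfold aPPpart
      rw [show ((1:Nat) : Int) = 1 by norm_num, PySem.List.pyRange_one_eq_nil (by norm_num), List.foldl_nil]
      unfold aPPpart at ih
      rw [PySem.List.pyRange_one_eq_nil (by norm_num), List.foldl_nil] at ih
      rw [ih]
      simp
    · have hb1 : (1 : Int) ≤ (b : Int) := by omega
      have hsplit : PySem.List.pyRange 1 ((b + 1 : Nat) : Int) 1
          = PySem.List.pyRange 1 (b : Int) 1 ++ [(b : Int)] := by
        have : ((b + 1 : Nat) : Int) = (b : Int) + 1 := by push_cast; ring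
        rw [this, PySem.List.pyRange_one_succ_right hb1]
      unfold aPPpart at ih ⊢
      rw [hsplit, List.foldl_append, List.foldl_cons, List.foldl_nil]
      set prev := (PySem.List.pyRange 1 (b : Int) 1).foldl (fun pp i =>
        if i - 1 < m then PySem.List.pySetD pp (i - 1) (PySem.Int.mod (i * PySem.List.pyGetD p i 0) pvMod) else pp)
        (List.replicate m.toNat 0) with hprev
      have hplen : prev.length = m.toNat := by rw [hprev]; exact aPPpart_length p m b
      by_cases hcm : (b : Int) - 1 < m
      · rw [if_pos hcm, PySem.List.pySetD_of_nonneg _ _ (by omega)]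
        have hbt : ((b : Int) - 1).toNat = b - 1 := by omega
        have hlen : t < (prev.set ((b:Int) - 1).toNat (PySem.Int.mod ((b:Int) * PySem.List.pyGetD p (b:Int) 0) pvMod)).length := by
          simp [hplen, ht]
        rw [List.getD_eq_getElem _ _ hlen, List.getElem_set]
        simp only [hbt]
        by_cases htb : b - 1 = t
        · have ht1 : t + 1 = b := by omega
          rw [if_pos htb, if_pos (by omega)]
          have hg : PySem.List.pyGetD p ((b : Nat) : Int) 0 = p.getD b 0 := PySem.List.pyGetD_natCast p b 0
          rw [hg]
          have : ((t : Int) + 1) = (b : Int) := by omega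
          rw [this, ← ht1]
        · rw [if_neg htb, ← List.getD_eq_getElem _ _ (by omega : t < prev.length), ih]
          have : (t + 1 < b) ↔ (t + 1 < b + 1) := by omega
          rw [if_congr this rfl rfl]
      · rw [if_neg hcm, ih]
        have : (t + 1 < b) ↔ (t + 1 < b + 1) := by omega
        rw [if_congr this rfl rfl]

lemma aPP_getD (p : List Int) (m : Int) (hm : 1 ≤ m) (t : Nat) (ht : t < m.toNat) :
    (aPP p m).getD t 0 = toI (Pc p t) := by
  have h : aPP p m = aPPpart p m p.length := rfl
  rw [h, aPPpart_getD p m hm p.length t ht]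
  unfold Pc
  by_cases h1 : t + 1 < p.length
  · rw [if_pos h1, if_pos h1, mod_toI]
  · rw [if_neg h1, if_neg h1, toI_zero]

-- R-loop characterization
lemma aRpart_succ (p : List Int) (m : Int) (b : Nat) (hb1 : 1 ≤ b) :
    aRpart p m (b + 1) = aRbody p m (aRpart p m b) (b : Int) := by
  unfold aRpart
  rw [show ((b + 1 : Nat) : Int) = (b : Int) + 1 by push_cast; ring,
      PySem.List.pyRange_one_succ_right (by omega : (1 : Int) ≤ (b : Int)), List.foldl_append,
      List.foldl_cons, List.foldl_nil]

lemma aR_inner (p : List Int) (m : Int) (hm : 1 ≤ m) (b : Nat) (hb1 : 1 ≤ b) (hb : b < m.toNat)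
    (ih : ∀ t, t < m.toNat → (aRpart p m b).getD t 0
        = if t < max b 1 then toI (Rc (Qc p m.toNat) t) else 0) :
    ((PySem.List.pyRange 1 ((b : Int) + 1) 1).foldl (fun s i =>
      if i < ((aQ p m).length : Int) ∧ (b : Int) - i < ((aRpart p m b).length : Int) then
        PySem.Int.mod (s + PySem.List.pyGetD (aQ p m) i 0 * PySem.List.pyGetD (aRpart p m b) ((b : Int) - i) 0) pvMod
      else s) 0)
    = toI (∑ i ∈ Finset.range b, Qc p m.toNat (i + 1) * Rc (Qc p m.toNat) (b - 1 - i)) := by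
  have hq : ((aQ p m).length : Int) = m := by
    rw [show aQ p m = aQpart p m p.length from rfl, aQpart_length]; omega
  have hr : ((aRpart p m b).length : Int) = m := by rw [aRpart_length]; omega
  rw [List.foldl_ext _ (fun s i =>
      PySem.Int.mod (s + PySem.List.pyGetD (aQ p m) i 0 * PySem.List.pyGetD (aRpart p m b) ((b : Int) - i) 0) pvMod)
      0 (by
        intro a i hi
        rw [PySem.List.mem_pyRange_one] at hi
        rw [hq, hr, if_pos (show i < m ∧ (b : Int) - i < m from ⟨by omega, by omega⟩)])]
  rw [modsum _ _ 0 le_rfl (by norm_num)]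
  rw [Int.cast_zero, zero_add]
  congr 1
  rw [PySem.List.pyRange_one, show ((b : Int) + 1 - 1).toNat = b from by omega, List.map_map,
      sum_map_range]
  apply Finset.sum_congr rfl
  intro i hi
  rw [Finset.mem_range] at hi
  show ((PySem.List.pyGetD (aQ p m) (1 + (i : Int)) 0 * PySem.List.pyGetD (aRpart p m b) ((b : Int) - (1 + (i : Int))) 0 : Int) : ZMod 998244353) = _
  rw [show (1 + (i : Int)) = ((i + 1 : Nat) : Int) by push_cast; ring]
  rw [show ((b : Int) - ((i + 1 : Nat) : Int)) = ((b - 1 - i : Nat) : Int) from by omega]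
  rw [PySem.List.pyGetD_natCast, PySem.List.pyGetD_natCast,
      aQ_getD p m hm (i + 1) (by omega), ih (b - 1 - i) (by omega), if_pos (by omega)]
  rw [Int.cast_mul, cast_toI, cast_toI]

lemma aRpart_getD (p : List Int) (m : Int) (hm : 1 ≤ m) (b : Nat) (hb : b ≤ m.toNat) :
    ∀ t, t < m.toNat →
      (aRpart p m b).getD t 0 = if t < max b 1 then toI (Rc (Qc p m.toNat) t) else 0 := by
  induction b with
  | zero =>
    intro t ht
    unfold aRpart
    rw [PySem.List.pyRange_one_eq_nil (by norm_num), List.foldl_nil,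
        PySem.List.pySetD_of_nonneg _ _ le_rfl]
    have hlen : t < ((List.replicate m.toNat (0:Int)).set (0:Int).toNat 1).length := by simpa using ht
    rw [List.getD_eq_getElem _ _ hlen, List.getElem_set]
    simp only [Int.toNat_zero]
    split
    · rename_i h
      rw [if_pos (by omega), ← h]
      rw [show Rc (Qc p m.toNat) 0 = 1 by rw [Rc], toI_one]
    · rename_i h
      rw [List.getElem_replicate, if_neg (by omega)]
  | succ b ih =>
    by_cases hb0 : b = 0
    · subst hb0
      intro t ht
      have h1 : aRpart p m 1 = aRpart p m 0 := by
        unfold aRpart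
        rw [show ((1 : Nat) : Int) = 1 by norm_num, PySem.List.pyRange_one_eq_nil (le_refl 1),
            PySem.List.pyRange_one_eq_nil (by norm_num)]
      rw [h1, ih (by omega) t ht]
      norm_num
    · intro t ht
      have ih' := ih (by omega)
      rw [aRpart_succ p m b (by omega)]
      simp only [aRbody]
      rw [aR_inner p m hm b (by omega) (by omega) ih']
      rw [PySem.List.pySetD_of_nonneg _ _ (by omega : (0:Int) ≤ ((b : Nat) : Int))]
      rw [List.getD_eq_getElem _ _ (by simp [aRpart_length, ht]), List.getElem_set]
      simp only [show (((b : Nat) : Int)).toNat = b from by omega]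
      by_cases htb : b = t
      · rw [if_pos htb, ← htb, if_pos (by omega)]
        have hRb : Rc (Qc p m.toNat) b
            = -(∑ i ∈ Finset.range b, Qc p m.toNat (i + 1) * Rc (Qc p m.toNat) (b - 1 - i)) := by
          conv_lhs => rw [show b = (b - 1) + 1 from by omega]
          rw [Rc, show (b - 1) + 1 = b from by omega]
        rw [hRb, mod_toI, Int.cast_neg, cast_toI]
      · rw [if_neg htb, ← List.getD_eq_getElem _ _ (by rw [aRpart_length]; omega : t < (aRpart p m b).length), ih' t ht]
        rw [show max b 1 = b from by omega, show max (b + 1) 1 = b + 1 from by omega]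
        by_cases htlt : t < b
        · rw [if_pos htlt, if_pos (by omega)]
        · rw [if_neg htlt, if_neg (by omega)]

lemma aR_getD (p : List Int) (m : Int) (hm : 1 ≤ m) (t : Nat) (ht : t < m.toNat) :
    (aR p m).getD t 0 = toI (Rc (Qc p m.toNat) t) := by
  have h : aR p m = aRpart p m m.toNat := by
    unfold aR aRpart; rw [Int.toNat_of_nonneg (by omega)]
  rw [h, aRpart_getD p m hm m.toNat le_rfl t ht, if_pos (by omega)]

-- A's l'-loop characterization
lemma aLPpart_succ (p : List Int) (m : Int) (b : Nat) :
    aLPpart p m (b + 1) = aLPbody p m (aLPpart p m b) (b : Int) := by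
  unfold aLPpart
  rw [show ((b + 1 : Nat) : Int) = (b : Int) + 1 by push_cast; ring,
      PySem.List.pyRange_one_succ_right (by omega : (0 : Int) ≤ (b : Int)), List.foldl_append,
      List.foldl_cons, List.foldl_nil]

lemma aLP_inner (p : List Int) (m : Int) (hm : 1 ≤ m) (b : Nat) (hb : b < m.toNat) :
    ((PySem.List.pyRange 0 ((b : Int) + 1) 1).foldl (fun s i =>
      if i < ((aPP p m).length : Int) ∧ (b : Int) - i < ((aR p m).length : Int) then
        PySem.Int.mod (s + PySem.List.pyGetD (aPP p m) i 0 * PySem.List.pyGetD (aR p m) ((b : Int) - i) 0) pvMod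
      else s) 0)
    = toI (LAc (Qc p m.toNat) (Pc p) b) := by
  have hpp : ((aPP p m).length : Int) = m := by
    rw [show aPP p m = aPPpart p m p.length from rfl, aPPpart_length]; omega
  have hr : ((aR p m).length : Int) = m := by rw [aR_length]; omega
  rw [List.foldl_ext _ (fun s i =>
      PySem.Int.mod (s + PySem.List.pyGetD (aPP p m) i 0 * PySem.List.pyGetD (aR p m) ((b : Int) - i) 0) pvMod)
      0 (by
        intro a i hi
        rw [PySem.List.mem_pyRange_one] at hi
        rw [hpp, hr, if_pos (show i < m ∧ (b : Int) - i < m from ⟨by omega, by omega⟩)])]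
  rw [modsum _ _ 0 le_rfl (by norm_num)]
  rw [Int.cast_zero, zero_add]
  congr 1
  rw [PySem.List.pyRange_zero, show ((b : Int) + 1).toNat = b + 1 from by omega, List.map_map,
      sum_map_range]
  unfold LAc
  apply Finset.sum_congr rfl
  intro i hi
  rw [Finset.mem_range] at hi
  show ((PySem.List.pyGetD (aPP p m) ((i : Nat) : Int) 0 * PySem.List.pyGetD (aR p m) ((b : Int) - ((i : Nat) : Int)) 0 : Int) : ZMod 998244353) = _
  rw [show ((b : Int) - ((i : Nat) : Int)) = ((b - i : Nat) : Int) from by omega]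
  rw [PySem.List.pyGetD_natCast, PySem.List.pyGetD_natCast,
      aPP_getD p m hm i (by omega), aR_getD p m hm (b - i) (by omega)]
  rw [Int.cast_mul, cast_toI, cast_toI]

lemma aLPpart_getD (p : List Int) (m : Int) (hm : 1 ≤ m) (b : Nat) (hb : b ≤ m.toNat) :
    ∀ t, t < m.toNat →
      (aLPpart p m b).getD t 0 = if t < b then toI (LAc (Qc p m.toNat) (Pc p) t) else 0 := by
  induction b with
  | zero =>
    intro t ht
    unfold aLPpart
    rw [PySem.List.pyRange_one_eq_nil (by norm_num), List.foldl_nil]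
    rw [List.getD_eq_getElem _ _ (by simpa using ht : t < (List.replicate m.toNat (0:Int)).length)]
    simp
  | succ b ih =>
    intro t ht
    have ih' := fun t ht => ih (by omega) t ht
    rw [aLPpart_succ p m b]
    simp only [aLPbody]
    rw [aLP_inner p m hm b (by omega)]
    rw [PySem.List.pySetD_of_nonneg _ _ (by omega : (0:Int) ≤ ((b : Nat) : Int))]
    rw [List.getD_eq_getElem _ _ (by simp [aLPpart_length, ht]), List.getElem_set]
    simp only [show (((b : Nat) : Int)).toNat = b from by omega]
    by_cases htb : b = t
    · rw [if_pos htb, ← htb, if_pos (by omega), mod_toI, cast_toI]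
    · rw [if_neg htb, ← List.getD_eq_getElem _ _ (by rw [aLPpart_length]; omega : t < (aLPpart p m b).length), ih' t ht]
      by_cases htlt : t < b
      · rw [if_pos htlt, if_pos (by omega)]
      · rw [if_neg htlt, if_neg (by omega)]

lemma aLP_getD (p : List Int) (m : Int) (hm : 1 ≤ m) (t : Nat) (ht : t < m.toNat) :
    (aLP p m).getD t 0 = toI (LAc (Qc p m.toNat) (Pc p) t) := by
  have h : aLP p m = aLPpart p m m.toNat := by
    unfold aLP aLPpart; rw [Int.toNat_of_nonneg (by omega)]
  rw [h, aLPpart_getD p m hm m.toNat le_rfl t ht, if_pos ht]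

-- B's l'-loop characterization
lemma cast_list_sum (L : List Int) :
    ((L.sum : Int) : ZMod 998244353) = (L.map (fun x => ((x : Int) : ZMod 998244353))).sum := by
  induction L with
  | nil => simp
  | cons x t ih => simp [ih]

lemma bLPpart_succ (p : List Int) (m : Int) (b : Nat) :
    bLPpart p m (b + 1) = bLPbody p (bLPpart p m b) (b : Int) := by
  unfold bLPpart
  rw [show ((b + 1 : Nat) : Int) = (b : Int) + 1 by push_cast; ring,
      PySem.List.pyRange_one_succ_right (by omega : (0 : Int) ≤ (b : Int)), List.foldl_append,
      List.foldl_cons, List.foldl_nil]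

lemma bLP_val (p : List Int) (m : Int) (hm : 1 ≤ m) (b : Nat) (hb : b < m.toNat)
    (ih : ∀ t, t < m.toNat → (bLPpart p m b).getD t 0
        = if t < b then toI (LBc (Qc p m.toNat) (Pc p) t) else 0) :
    PySem.Int.mod ((PySem.List.pyRange 1 (min (b : Int) ((p.length : Int) - 1) + 1) 1).foldl
      (fun s i => s - PySem.Int.mod (PySem.List.pyGetD p i 0) pvMod * PySem.List.pyGetD (bLPpart p m b) ((b : Int) - i) 0)
      (if (b : Int) + 1 < (p.length : Int) then
        PySem.Int.mod (((b : Int) + 1) * PySem.List.pyGetD p ((b : Int) + 1) 0) pvMod else 0))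
      pvMod
    = toI (LBc (Qc p m.toNat) (Pc p) b) := by
  have hcge : (0 : Int) ≤ (b : Int) := by omega
  have hrange : PySem.List.pyRange 1 (min (b : Int) ((p.length : Int) - 1) + 1) 1
      = PySem.List.pyRange 1 (((min (b : Int) ((p.length : Int) - 1)).toNat : Int) + 1) 1 := by
    by_cases hn : (p.length : Int) - 1 < 0
    · rw [PySem.List.pyRange_one_eq_nil (by omega), PySem.List.pyRange_one_eq_nil (by omega)]
    · rw [Int.toNat_of_nonneg (show (0 : Int) ≤ min (b : Int) ((p.length : Int) - 1) by omega)]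
  rw [hrange, subsum, mod_toI, Int.cast_sub]
  set c := (min (b : Int) ((p.length : Int) - 1)).toNat with hc
  have hcb : c ≤ b := by omega
  have hs0 : ((if (b : Int) + 1 < (p.length : Int) then
        PySem.Int.mod (((b : Int) + 1) * PySem.List.pyGetD p ((b : Int) + 1) 0) pvMod else 0 : Int) : ZMod 998244353)
      = Pc p b := by
    unfold Pc
    by_cases h : b + 1 < p.length
    · rw [if_pos (by omega : (b : Int) + 1 < (p.length : Int)), if_pos h, cast_mod,
          show ((b : Int) + 1) = ((b + 1 : Nat) : Int) by push_cast; ring, PySem.List.pyGetD_natCast]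
    · rw [if_neg (by omega), if_neg h]
      norm_num
  have hsum : ((((PySem.List.pyRange 1 ((c : Int) + 1) 1).map
        (fun i => PySem.Int.mod (PySem.List.pyGetD p i 0) pvMod * PySem.List.pyGetD (bLPpart p m b) ((b : Int) - i) 0)).sum : Int) : ZMod 998244353)
      = ∑ i ∈ Finset.range b, Qc p m.toNat (i + 1) * LBc (Qc p m.toNat) (Pc p) (b - 1 - i) := by
    rw [cast_list_sum, List.map_map, PySem.List.pyRange_one,
        show ((c : Int) + 1 - 1).toNat = c from by omega, List.map_map, sum_map_range]
    rw [← Finset.sum_subset (show Finset.range c ⊆ Finset.range b by intro x hx; simp only [Finset.mem_range] at hx ⊢; omega) (by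
      intro i hib hic
      rw [Finset.mem_range] at hib
      rw [Finset.mem_range] at hic
      have hQ0 : Qc p m.toNat (i + 1) = 0 := by
        unfold Qc
        rw [if_neg (by omega), if_neg (by omega)]
      rw [hQ0, zero_mul])]
    apply Finset.sum_congr rfl
    intro i hi
    rw [Finset.mem_range] at hi
    show ((PySem.Int.mod (PySem.List.pyGetD p (1 + (i : Int)) 0) pvMod * PySem.List.pyGetD (bLPpart p m b) ((b : Int) - (1 + (i : Int))) 0 : Int) : ZMod 998244353) = _
    rw [show (1 + (i : Int)) = ((i + 1 : Nat) : Int) by push_cast; ring,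
        show ((b : Int) - ((i + 1 : Nat) : Int)) = ((b - 1 - i : Nat) : Int) from by omega,
        PySem.List.pyGetD_natCast, PySem.List.pyGetD_natCast, Int.cast_mul, cast_mod,
        ih (b - 1 - i) (by omega), if_pos (by omega), cast_toI]
    have hQ : Qc p m.toNat (i + 1) = ((p.getD (i + 1) 0 : Int) : ZMod 998244353) := by
      unfold Qc
      rw [if_neg (by omega), if_pos (show i + 1 < p.length ∧ i + 1 < m.toNat from ⟨by omega, by omega⟩)]
    rw [hQ]
  rw [hs0, hsum]
  congr 1
  cases b with
  | zero => simp [LBc]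
  | succ b' =>
    rw [LBc]
    simp only [Nat.add_sub_cancel]

lemma bLPpart_getD (p : List Int) (m : Int) (hm : 1 ≤ m) (b : Nat) (hb : b ≤ m.toNat) :
    ∀ t, t < m.toNat →
      (bLPpart p m b).getD t 0 = if t < b then toI (LBc (Qc p m.toNat) (Pc p) t) else 0 := by
  induction b with
  | zero =>
    intro t ht
    unfold bLPpart
    rw [PySem.List.pyRange_one_eq_nil (by norm_num), List.foldl_nil]
    rw [List.getD_eq_getElem _ _ (by simpa using ht : t < (List.replicate m.toNat (0:Int)).length)]
    simp
  | succ b ih =>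
    intro t ht
    have ih' := fun t ht => ih (by omega) t ht
    rw [bLPpart_succ p m b]
    simp only [bLPbody]
    rw [bLP_val p m hm b (by omega) ih']
    rw [PySem.List.pySetD_of_nonneg _ _ (by omega : (0:Int) ≤ ((b : Nat) : Int))]
    rw [List.getD_eq_getElem _ _ (by simp [bLPpart_length, ht]), List.getElem_set]
    simp only [show (((b : Nat) : Int)).toNat = b from by omega]
    by_cases htb : b = t
    · rw [if_pos htb, ← htb, if_pos (by omega)]
    · rw [if_neg htb, ← List.getD_eq_getElem _ _ (by rw [bLPpart_length]; omega : t < (bLPpart p m b).length), ih' t ht]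
      by_cases htlt : t < b
      · rw [if_pos htlt, if_pos (by omega)]
      · rw [if_neg htlt, if_neg (by omega)]

lemma bLP_getD (p : List Int) (m : Int) (hm : 1 ≤ m) (t : Nat) (ht : t < m.toNat) :
    (bLP p m).getD t 0 = toI (LBc (Qc p m.toNat) (Pc p) t) := by
  have h : bLP p m = bLPpart p m m.toNat := by
    unfold bLP bLPpart; rw [Int.toNat_of_nonneg (by omega)]
  rw [h, bLPpart_getD p m hm m.toNat le_rfl t ht, if_pos ht]

-- ===== VERDICT (by name: the statement is the Claim_ definition above) =====
theorem ln_1_plus_p_spec : Claim_equal_ln_1_plus_p := by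
  intro p m _ hpre
  have hm : (1 : Int) ≤ m := hpre
  unfold Spec_ln_1_plus_p
  rw [show ln_1_plus_p p m = aFin p m from rfl, show ln_1_plus_p_alt p m = bFin p m from rfl]
  unfold aFin bFin
  apply List.foldl_ext
  intro l k hk
  rw [PySem.List.mem_pyRange_one] at hk
  have hlen : ((aLP p m).length : Int) = m := by rw [aLP_length]; omega
  rw [hlen, if_pos (by omega : k - 1 < m)]
  have hget : PySem.List.pyGetD (aLP p m) (k - 1) 0 = PySem.List.pyGetD (bLP p m) (k - 1) 0 := by
    rw [show (k - 1 : Int) = (((k - 1).toNat : Nat) : Int) from by omega,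
        PySem.List.pyGetD_natCast, PySem.List.pyGetD_natCast,
        aLP_getD p m hm _ (by omega), bLP_getD p m hm _ (by omega)]
    exact congrArg toI (LA_eq_LB _ _ (by simp [Qc]) _)
  rw [hget]
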